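-- pv_equiv track=rewrite | github.com/Ajtiwari26/NukkadMartBackend | app/core/llm_cache.py | _fuzzy_match_action
-- ===== SOURCE A (Python) =====
-- from typing import Optional, Any, Dict, Set
--
-- _ACTION_KEYWORDS: Dict[str, list] = {
--     "add": [
--         "add", "daal", "daalo", "lelo", "lena", "rakh", "rakho",
--         "chahiye", "chaahiye", "laga", "lagao", "order", "mangwa", "bhej",
--     ],
--     "remove": [
--         "remove", "hata", "hatao", "nikaal", "nikaalo", "cancel",
--         "chhod", "chhodho", "chhoddo",
--     ],
--     "update": [
--         "update", "change", "badal", "badlo", "badhao",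
--     ],
--     "query": [
--         "price", "batao", "dikhao", "dikha", "search", "dhundho", "show",
--     ],
--     "repeat": [
--         "repeat", "dobara", "wapas",
--     ],
-- }
--
-- def _levenshtein_distance(s1: str, s2: str) -> int:
--     """Lightweight Levenshtein distance (no external deps)."""
--     if len(s1) < len(s2):
--         return _levenshtein_distance(s2, s1)
--     if len(s2) == 0:
--         return len(s1)
--     prev_row = range(len(s2) + 1)
--     for i, c1 in enumerate(s1):
--         curr_row = [i + 1]
--         for j, c2 in enumerate(s2):
--             cost = 0 if c1 == c2 else 1
--             curr_row.append(min(curr_row[j] + 1, prev_row[j + 1] + 1, prev_row[j] + cost))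
--         prev_row = curr_row
--     return prev_row[-1]
--
-- def _fuzzy_match_action(word: str, max_distance: int = 1) -> Optional[str]:
--     """
--     Fuzzy-match a single word against all action keywords.
--     Returns the canonical action name, or None if no close match.
--     Allows `max_distance` character edits (default: 1 typo).
--     """
--     if len(word) < 3:
--         return None  # Too short to fuzzy match reliably
--
--     for action, keywords in _ACTION_KEYWORDS.items():
--         for keyword in keywords:
--             dist = _levenshtein_distance(word, keyword)
--             # Allow 1 edit for words ≤5 chars, 2 edits for longer words
--             allowed = max_distance if len(keyword) <= 5 else max_distance + 1
--             if dist <= allowed: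
--                 return action
--     return None
-- ===== SOURCE B (Python) =====
-- from typing import Optional, Dict
--
-- _ACTION_KEYWORDS: Dict[str, list] = {
--     "add": [
--         "add", "daal", "daalo", "lelo", "lena", "rakh", "rakho",
--         "chahiye", "chaahiye", "laga", "lagao", "order", "mangwa", "bhej",
--     ],
--     "remove": [
--         "remove", "hata", "hatao", "nikaal", "nikaalo", "cancel",
--         "chhod", "chhodho", "chhoddo",
--     ],
--     "update": [
--         "update", "change", "badal", "badlo", "badhao",
--     ],
--     "query": [
--         "price", "batao", "dikhao", "dikha", "search", "dhundho", "show",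
--     ],
--     "repeat": [
--         "repeat", "dobara", "wapas",
--     ],
-- }
--
-- def _levenshtein_distance(s1: str, s2: str) -> int:
--     """Tabulate the edit-distance recurrence over anti-diagonals into a memo dict."""
--     n1, n2 = len(s1), len(s2)
--     memo = {}
--     for d in range(n1 + n2 + 1):
--         for i in range(max(0, d - n2), min(d, n1) + 1):
--             j = d - i
--             if i == 0:
--                 memo[(i, j)] = j
--             elif j == 0:
--                 memo[(i, j)] = i
--             else:
--                 cost = 0 if s1[i - 1] == s2[j - 1] else 1
--                 memo[(i, j)] = min(memo[(i, j - 1)] + 1,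
--                                    memo[(i - 1, j)] + 1,
--                                    memo[(i - 1, j - 1)] + cost)
--     return memo[(n1, n2)]
--
-- def _fuzzy_match_action(word: str, max_distance: int = 1) -> Optional[str]:
--     if len(word) < 3:
--         return None
--     for action, keywords in _ACTION_KEYWORDS.items():
--         for keyword in keywords:
--             dist = _levenshtein_distance(word, keyword)
--             allowed = max_distance if len(keyword) <= 5 else max_distance + 1
--             if dist <= allowed:
--                 return action
--     return None
-- ===== Notes on version B (the rewrite author's own statement) =====
-- stated objective: alternative
-- what changed: Levenshtein is recomputed by tabulating the edit-distance recurrence over anti-diagonals into an (i,j)-keyed memo dict (full-table wavefront, no rolling two-row list and no len-based argument swap); the keyword loops are unchanged.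
import Mathlib
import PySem

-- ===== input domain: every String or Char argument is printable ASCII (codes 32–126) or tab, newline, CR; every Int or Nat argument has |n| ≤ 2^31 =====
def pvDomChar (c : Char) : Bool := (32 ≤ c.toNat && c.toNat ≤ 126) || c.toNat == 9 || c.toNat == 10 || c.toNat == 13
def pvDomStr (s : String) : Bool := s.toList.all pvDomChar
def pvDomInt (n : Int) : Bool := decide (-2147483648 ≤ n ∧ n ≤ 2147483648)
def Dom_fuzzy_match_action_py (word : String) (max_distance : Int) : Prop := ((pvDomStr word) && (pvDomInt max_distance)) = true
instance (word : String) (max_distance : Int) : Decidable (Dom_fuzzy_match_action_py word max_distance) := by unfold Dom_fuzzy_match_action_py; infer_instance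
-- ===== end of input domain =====

-- B replaces the two-row rolling DP (with its len-based argument swap) by an anti-diagonal
-- tabulation of the same edit-distance recurrence into an (i,j)-keyed memo dict; same cost.

-- the module-level _ACTION_KEYWORDS constant (shared data, used by both ports)
def pvKeywords : List (String × List String) :=
  [("add", ["add", "daal", "daalo", "lelo", "lena", "rakh", "rakho",
            "chahiye", "chaahiye", "laga", "lagao", "order", "mangwa", "bhej"]),
   ("remove", ["remove", "hata", "hatao", "nikaal", "nikaalo", "cancel",
               "chhod", "chhodho", "chhoddo"]),
   ("update", ["update", "change", "badal", "badlo", "badhao"]),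
   ("query", ["price", "batao", "dikhao", "dikha", "search", "dhundho", "show"]),
   ("repeat", ["repeat", "dobara", "wapas"])]

-- ===== PORT A =====
-- _levenshtein_distance: rolling two-row DP with the len-based argument swap
def levA (s1 s2 : List Char) : Int :=
  if h : s1.length < s2.length then levA s2 s1
  else if s2.length = 0 then (s1.length : Int)
  else
    let prev0 := PySem.List.pyRange 0 ((s2.length : Int) + 1) 1
    let final := (PySem.List.enumerate s1 0).foldl (fun prev_row ic =>
        (PySem.List.enumerate s2 0).foldl (fun curr_row jc =>
            curr_row ++ [min (min (PySem.List.pyGetD curr_row jc.1 0 + 1)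
                                  (PySem.List.pyGetD prev_row (jc.1 + 1) 0 + 1))
                             (PySem.List.pyGetD prev_row jc.1 0 +
                                (if ic.2 = jc.2 then (0 : Int) else 1))])
          [ic.1 + 1]) prev0
    -- curr_row[j], prev_row[j], prev_row[j+1], prev_row[-1] are always in range: pyGetD is exact here
    PySem.List.pyGetD final (-1) 0
termination_by (if s1.length < s2.length then 1 else 0)
decreasing_by simp [Nat.lt_asymm h, h]

-- inner 'for keyword in keywords' loop (early return on the first close keyword)
def matchKwA (word : List Char) (max_distance : Int) : List String → Bool
  | [] => false
  | kw :: rest =>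
    let dist := levA word kw.toList
    let allowed := if (kw.toList.length : Int) ≤ 5 then max_distance else max_distance + 1
    if dist ≤ allowed then true else matchKwA word max_distance rest

-- outer 'for action, keywords in _ACTION_KEYWORDS.items()' loop
def findA (word : List Char) (max_distance : Int) : List (String × List String) → Option String
  | [] => none
  | (action, kws) :: rest =>
    if matchKwA word max_distance kws then some action else findA word max_distance rest

def fuzzy_match_action_py (word : String) (max_distance : Int) : Option String :=
  if (word.toList.length : Int) < 3 then none
  else findA word.toList max_distance pvKeywords

-- ===== PORT B =====
-- B's _levenshtein_distance: anti-diagonal tabulation into an (i,j)-keyed memo dict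
def levB (s1 s2 : List Char) : Int :=
  let n1 : Int := s1.length
  let n2 : Int := s2.length
  let memo := (PySem.List.pyRange 0 (n1 + n2 + 1) 1).foldl (fun memo d =>
      (PySem.List.pyRange (max 0 (d - n2)) (min d n1 + 1) 1).foldl (fun memo i =>
          let j := d - i
          if i = 0 then memo.insert (i, j) j
          else if j = 0 then memo.insert (i, j) i
          else
            -- memo[(i,j-1)], memo[(i-1,j)], memo[(i-1,j-1)] were filled on earlier
            -- anti-diagonals, and s1[i-1], s2[j-1] are in range: getD/pyGetD are exact here
            memo.insert (i, j)
              (min (min (memo.getD (i, j - 1) 0 + 1)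
                        (memo.getD (i - 1, j) 0 + 1))
                   (memo.getD (i - 1, j - 1) 0 +
                      (if PySem.List.pyGetD s1 (i - 1) ' ' = PySem.List.pyGetD s2 (j - 1) ' '
                       then (0 : Int) else 1))))
        memo)
    (PySem.Dict.empty : PySem.Dict (Int × Int) Int)
  memo.getD (n1, n2) 0

def matchKwB (word : List Char) (max_distance : Int) : List String → Bool
  | [] => false
  | kw :: rest =>
    let dist := levB word kw.toList
    let allowed := if (kw.toList.length : Int) ≤ 5 then max_distance else max_distance + 1
    if dist ≤ allowed then true else matchKwB word max_distance rest

def findB (word : List Char) (max_distance : Int) : List (String × List String) → Option String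
  | [] => none
  | (action, kws) :: rest =>
    if matchKwB word max_distance kws then some action else findB word max_distance rest

def fuzzy_match_action_py_alt (word : String) (max_distance : Int) : Option String :=
  if (word.toList.length : Int) < 3 then none
  else findB word.toList max_distance pvKeywords

-- ===== PRECONDITION & SPEC =====
def Spec_fuzzy_match_action_py (word : String) (max_distance : Int) (out : Option String) : Prop := out = fuzzy_match_action_py_alt word max_distance
instance (word : String) (max_distance : Int) (out : Option String) : Decidable (Spec_fuzzy_match_action_py word max_distance out) := by unfold Spec_fuzzy_match_action_py; infer_instance

-- ===== CLAIM (what is proved, stated in full; the proofs are below) =====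
def Claim_equal_fuzzy_match_action_py : Prop := ∀ (word : String) (max_distance : Int), Dom_fuzzy_match_action_py word max_distance → Spec_fuzzy_match_action_py word max_distance (fuzzy_match_action_py word max_distance)

-- ===== LEMMAS AND PROOFS =====

-- the edit-distance recurrence both programs tabulate (A's cost-style min of three)
def Espec (s t : List Char) : Nat → Nat → Int
  | 0, j => (j : Int)
  | (i+1), 0 => ((i : Int) + 1)
  | (i+1), (j+1) =>
      min (min (Espec s t (i+1) j + 1) (Espec s t i (j+1) + 1))
          (Espec s t i j + (if s.getD i ' ' = t.getD j ' ' then (0 : Int) else 1))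
termination_by i j => i + j

lemma Espec_zero (s t : List Char) (j : Nat) : Espec s t 0 j = (j : Int) := by
  cases j <;> rw [Espec]

lemma Espec_right_zero (s t : List Char) (i : Nat) : Espec s t i 0 = (i : Int) := by
  cases i with
  | zero => rw [Espec]
  | succ n => rw [Espec]; simp

lemma Espec_succ_succ (s t : List Char) (i j : Nat) :
    Espec s t (i+1) (j+1) =
      min (min (Espec s t (i+1) j + 1) (Espec s t i (j+1) + 1))
          (Espec s t i j + (if s.getD i ' ' = t.getD j ' ' then (0 : Int) else 1)) := by
  rw [Espec]

lemma Espec_symm (s t : List Char) (i j : Nat) : Espec s t i j = Espec t s j i := by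
  induction hn : i + j using Nat.strong_induction_on generalizing i j with
  | _ n ih =>
    subst hn
    match i, j with
    | 0, j => rw [Espec_zero, Espec_right_zero]
    | (i+1), 0 => rw [Espec_zero, Espec_right_zero]
    | (i+1), (j+1) =>
      rw [Espec_succ_succ, Espec_succ_succ,
        ih (i + 1 + j) (by omega) (i+1) j rfl,
        ih (i + (j + 1)) (by omega) i (j+1) rfl,
        ih (i + j) (by omega) i j rfl]
      have hc : (if s.getD i ' ' = t.getD j ' ' then (0 : Int) else 1)
          = (if t.getD j ' ' = s.getD i ' ' then (0 : Int) else 1) := by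
        by_cases h : s.getD i ' ' = t.getD j ' ' <;> simp [eq_comm]
      rw [hc]
      omega

def rowE (s t : List Char) (i : Nat) : List Int :=
  (List.range (t.length + 1)).map fun j => Espec s t i j

lemma innerA (s t : List Char) (i : Nat) (c1 : Char) (prev : List Int)
    (hc : c1 = s.getD i ' ') (hp : prev = rowE s t i) :
    ∀ (t2 : List Char) (st : Nat) (acc : List Int),
      t2 = t.drop st → st ≤ t.length →
      acc = (List.range (st + 1)).map (fun j => Espec s t (i + 1) j) →
      (PySem.List.enumerate t2 (st : Int)).foldl
        (fun curr_row jc =>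
          curr_row ++ [min (min (PySem.List.pyGetD curr_row jc.1 0 + 1)
                                (PySem.List.pyGetD prev (jc.1 + 1) 0 + 1))
                           (PySem.List.pyGetD prev jc.1 0 +
                              (if c1 = jc.2 then (0 : Int) else 1))])
        acc = rowE s t (i + 1) := by
  intro t2
  induction t2 with
  | nil =>
    intro st acc ht hst hacc
    have hlen := congrArg List.length ht
    simp at hlen
    have hst' : st = t.length := by omega
    subst hst'
    rw [PySem.List.enumerate_nil, List.foldl_nil, hacc, rowE]
  | cons c2 rest ih =>
    intro st acc ht hst hacc
    have hlen := congrArg List.length ht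
    simp at hlen
    have hlt : st < t.length := by omega
    have hdrop : t.drop st = t[st] :: t.drop (st + 1) := List.drop_eq_getElem_cons hlt
    rw [hdrop] at ht
    injection ht with hc2 hrest
    rw [PySem.List.enumerate_cons, List.foldl_cons]
    have hcast : (st : Int) + 1 = ((st + 1 : Nat) : Int) := by push_cast; ring
    rw [hcast]
    apply ih (st + 1) _ hrest (by omega)
    -- the appended cell is Espec s t (i+1) (st+1)
    have e1 : PySem.List.pyGetD acc (st : Int) 0 = Espec s t (i + 1) st := by
      rw [PySem.List.pyGetD_natCast, hacc]
      simp [List.getD]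
    have e2 : PySem.List.pyGetD prev ((st + 1 : Nat) : Int) 0 = Espec s t i (st + 1) := by
      rw [PySem.List.pyGetD_natCast, hp, rowE]
      simp [List.getD, (by omega : st + 1 < t.length + 1)]
    have e3 : PySem.List.pyGetD prev (st : Int) 0 = Espec s t i st := by
      rw [PySem.List.pyGetD_natCast, hp, rowE]
      simp [List.getD, (by omega : st < t.length + 1)]
    have ecost : (if c1 = c2 then (0 : Int) else 1)
        = (if s.getD i ' ' = t.getD st ' ' then (0 : Int) else 1) := by
      rw [hc, List.getD_eq_getElem t ' ' hlt, ← hc2]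
    simp only [e1, e2, e3, ecost]
    rw [hacc, ← Espec_succ_succ, List.range_succ, List.map_append]
    simp [List.range_succ]

lemma outerA (s t : List Char) :
    ∀ (s2 : List Char) (st : Nat) (prevr : List Int),
      s2 = s.drop st → st ≤ s.length → prevr = rowE s t st →
      (PySem.List.enumerate s2 (st : Int)).foldl
        (fun prev_row ic =>
          (PySem.List.enumerate t 0).foldl
            (fun curr_row jc =>
              curr_row ++ [min (min (PySem.List.pyGetD curr_row jc.1 0 + 1)
                                    (PySem.List.pyGetD prev_row (jc.1 + 1) 0 + 1))
                               (PySem.List.pyGetD prev_row jc.1 0 +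
                                  (if ic.2 = jc.2 then (0 : Int) else 1))])
            [ic.1 + 1])
        prevr = rowE s t s.length := by
  intro s2
  induction s2 with
  | nil =>
    intro st prevr ht hst hprev
    have hlen := congrArg List.length ht
    simp at hlen
    have hst' : st = s.length := by omega
    subst hst'
    rw [PySem.List.enumerate_nil, List.foldl_nil, hprev]
  | cons c1 rest ih =>
    intro st prevr ht hst hprev
    have hlen := congrArg List.length ht
    simp at hlen
    have hlt : st < s.length := by omega
    have hdrop : s.drop st = s[st] :: s.drop (st + 1) := List.drop_eq_getElem_cons hlt
    rw [hdrop] at ht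
    injection ht with hc1 hrest
    rw [PySem.List.enumerate_cons, List.foldl_cons]
    have hcast : (st : Int) + 1 = ((st + 1 : Nat) : Int) := by push_cast; ring
    rw [hcast]
    apply ih (st + 1) _ hrest (by omega)
    rw [← hcast]
    have h2 := innerA s t st c1 prevr
      (by rw [List.getD_eq_getElem s ' ' hlt]; exact hc1) hprev t 0 [(st : Int) + 1]
      (by simp) (by omega) (by simp [Espec_right_zero])
    rw [Nat.cast_zero] at h2
    exact h2

lemma row_zero (s t : List Char) :
    PySem.List.pyRange 0 ((t.length : Int) + 1) 1 = rowE s t 0 := by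
  rw [PySem.List.pyRange_one, rowE]
  have : (((t.length : Int) + 1) - 0).toNat = t.length + 1 := by omega
  rw [this]
  apply List.map_congr_left
  intro j hj
  simp [Espec_zero]

lemma row_last (s t : List Char) (i : Nat) :
    PySem.List.pyGetD (rowE s t i) (-1) 0 = Espec s t i t.length := by
  rw [rowE, List.range_succ, List.map_append, List.map_singleton]
  exact PySem.List.pyGetD_neg_one_append_singleton _ _ _

lemma levA_noswap (s t : List Char) (h : ¬ s.length < t.length) :
    levA s t = Espec s t s.length t.length := by
  rw [levA, dif_neg h]
  by_cases h0 : t.length = 0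
  · rw [if_pos h0, h0, Espec_right_zero]
  · rw [if_neg h0]
    simp only
    have h1 := outerA s t s 0 (rowE s t 0) (by simp) (by omega) rfl
    rw [Nat.cast_zero] at h1
    rw [row_zero s t, h1, row_last]

lemma levA_eq (s t : List Char) : levA s t = Espec s t s.length t.length := by
  by_cases h : s.length < t.length
  · rw [levA, dif_pos h, levA_noswap t s (by omega), Espec_symm]
  · exact levA_noswap s t h

def stepCell (s t : List Char) (d lo : Int) (m : PySem.Dict (Int × Int) Int) :
    PySem.Dict (Int × Int) Int :=
  if lo = 0 then m.insert (lo, d - lo) (d - lo)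
  else if d - lo = 0 then m.insert (lo, d - lo) lo
  else
    m.insert (lo, d - lo)
      (min (min (m.getD (lo, d - lo - 1) 0 + 1) (m.getD (lo - 1, d - lo) 0 + 1))
        (m.getD (lo - 1, d - lo - 1) 0 +
          (if PySem.List.pyGetD s (lo - 1) ' ' = PySem.List.pyGetD t (d - lo - 1) ' '
           then (0 : Int) else 1)))

lemma innerB (s t : List Char) (d : Int) :
    ∀ (fuel : Nat) (lo : Int) (m : PySem.Dict (Int × Int) Int),
      fuel = (min d (s.length : Int) + 1 - lo).toNat →
      max 0 (d - (t.length : Int)) ≤ lo →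
      (∀ a b : Nat, a ≤ s.length → b ≤ t.length →
        ((a : Int) + (b : Int) < d ∨ ((a : Int) + (b : Int) = d ∧ (a : Int) < lo)) →
        m.getD ((a : Int), (b : Int)) 0 = Espec s t a b) →
      ∀ a b : Nat, a ≤ s.length → b ≤ t.length → (a : Int) + (b : Int) ≤ d →
        ((PySem.List.pyRange lo (min d (s.length : Int) + 1) 1).foldl (fun memo i =>
            let j := d - i
            if i = 0 then memo.insert (i, j) j
            else if j = 0 then memo.insert (i, j) i
            else
              memo.insert (i, j)
                (min (min (memo.getD (i, j - 1) 0 + 1)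
                          (memo.getD (i - 1, j) 0 + 1))
                     (memo.getD (i - 1, j - 1) 0 +
                        (if PySem.List.pyGetD s (i - 1) ' ' = PySem.List.pyGetD t (j - 1) ' '
                         then (0 : Int) else 1)))) m).getD ((a : Int), (b : Int)) 0
          = Espec s t a b := by
  intro fuel
  induction fuel with
  | zero =>
    intro lo m hfuel hlo Hm a b ha hb hab
    rw [PySem.List.pyRange_one_eq_nil (by omega), List.foldl_nil]
    apply Hm a b ha hb
    by_cases h : (a : Int) + (b : Int) < d
    · exact Or.inl h
    · refine Or.inr ⟨by omega, by omega⟩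
  | succ fuel ih =>
    intro lo m hfuel hlo Hm a b ha hb hab
    have hlt : lo < min d (s.length : Int) + 1 := by omega
    rw [PySem.List.pyRange_one_cons hlt, List.foldl_cons]
    have hlo0 : 0 ≤ lo := by omega
    have hlon1 : lo ≤ (s.length : Int) := by omega
    have hlod : lo ≤ d := by omega
    have hjub : d - lo ≤ (t.length : Int) := by omega
    -- the inserted cell is correct
    have key : ∀ (m' : PySem.Dict (Int × Int) Int) (v : Int),
        v = Espec s t lo.toNat (d - lo).toNat →
        (∀ a b : Nat, a ≤ s.length → b ≤ t.length →
          ((a : Int) + (b : Int) < d ∨ ((a : Int) + (b : Int) = d ∧ (a : Int) < lo)) →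
          m'.getD ((a : Int), (b : Int)) 0 = Espec s t a b) →
        ∀ a b : Nat, a ≤ s.length → b ≤ t.length →
          ((a : Int) + (b : Int) < d ∨ ((a : Int) + (b : Int) = d ∧ (a : Int) < lo + 1)) →
          (m'.insert (lo, d - lo) v).getD ((a : Int), (b : Int)) 0 = Espec s t a b := by
      intro m' v hv Hm' a' b' ha' hb' hcond
      rw [PySem.Dict.getD_insert]
      by_cases hk : ((a' : Int), (b' : Int)) = ((lo : Int), d - lo)
      · rw [if_pos hk]
        have h1 : (a' : Int) = lo := congrArg Prod.fst hk
        have h2 : (b' : Int) = d - lo := congrArg Prod.snd hk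
        have : lo.toNat = a' := by omega
        have h4 : (d - lo).toNat = b' := by omega
        rw [hv, this, h4]
      · rw [if_neg hk]
        apply Hm' a' b' ha' hb'
        rcases hcond with h | ⟨hsum, hlt'⟩
        · exact Or.inl h
        · refine Or.inr ⟨hsum, ?_⟩
          by_cases heq : (a' : Int) = lo
          · exact absurd (by rw [heq]; congr 1; omega) hk
          · omega
    have step : (∀ a b : Nat, a ≤ s.length → b ≤ t.length →
        ((a : Int) + (b : Int) < d ∨ ((a : Int) + (b : Int) = d ∧ (a : Int) < lo + 1)) →
        (stepCell s t d lo m).getD ((a : Int), (b : Int)) 0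
          = Espec s t a b) := by
      unfold stepCell
      by_cases h0 : lo = 0
      · rw [if_pos h0]
        apply key m (d - lo) ?_ Hm
        subst h0
        simp only [Int.toNat_zero, Espec_zero]
        omega
      · rw [if_neg h0]
        by_cases hj0 : d - lo = 0
        · rw [if_pos hj0]
          apply key m lo ?_ Hm
          simp only [hj0, Int.toNat_zero, Espec_right_zero]
          omega
        · rw [if_neg hj0]
          apply key m _ ?_ Hm
          -- compute the three lookups and the cost
          set k : Nat := lo.toNat - 1 with hk
          set l : Nat := (d - lo).toNat - 1 with hl
          have hak : lo.toNat = k + 1 := by omega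
          have hbl : (d - lo).toNat = l + 1 := by omega
          have c1 : (lo, d - lo - 1) = (((k + 1 : Nat) : Int), ((l : Nat) : Int)) := by
            congr 1 <;> omega
          have c2 : (lo - 1, d - lo) = (((k : Nat) : Int), ((l + 1 : Nat) : Int)) := by
            congr 1 <;> omega
          have c3 : (lo - 1, d - lo - 1) = (((k : Nat) : Int), ((l : Nat) : Int)) := by
            congr 1 <;> omega
          have g1 : m.getD (lo, d - lo - 1) 0 = Espec s t (k + 1) l := by
            rw [c1]; exact Hm (k + 1) l (by omega) (by omega) (Or.inl (by omega))
          have g2 : m.getD (lo - 1, d - lo) 0 = Espec s t k (l + 1) := by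
            rw [c2]; exact Hm k (l + 1) (by omega) (by omega) (Or.inl (by omega))
          have g3 : m.getD (lo - 1, d - lo - 1) 0 = Espec s t k l := by
            rw [c3]; exact Hm k l (by omega) (by omega) (Or.inl (by omega))
          have gs : PySem.List.pyGetD s (lo - 1) ' ' = s.getD k ' ' := by
            rw [show lo - 1 = ((k : Nat) : Int) by omega, PySem.List.pyGetD_natCast]
          have gt : PySem.List.pyGetD t (d - lo - 1) ' ' = t.getD l ' ' := by
            rw [show d - lo - 1 = ((l : Nat) : Int) by omega, PySem.List.pyGetD_natCast]
          rw [g1, g2, g3, gs, gt, hak, hbl, Espec_succ_succ]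
    exact ih (lo + 1) _ (by omega) (by omega) step a b ha hb hab

lemma outerB (s t : List Char) :
    ∀ (fuel : Nat) (lo : Int) (m : PySem.Dict (Int × Int) Int),
      fuel = ((s.length : Int) + (t.length : Int) + 1 - lo).toNat →
      0 ≤ lo →
      (∀ a b : Nat, a ≤ s.length → b ≤ t.length → (a : Int) + (b : Int) < lo →
        m.getD ((a : Int), (b : Int)) 0 = Espec s t a b) →
      ∀ a b : Nat, a ≤ s.length → b ≤ t.length →
        ((PySem.List.pyRange lo ((s.length : Int) + (t.length : Int) + 1) 1).foldl (fun memo d =>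
            (PySem.List.pyRange (max 0 (d - (t.length : Int))) (min d (s.length : Int) + 1) 1).foldl
              (fun memo i =>
                let j := d - i
                if i = 0 then memo.insert (i, j) j
                else if j = 0 then memo.insert (i, j) i
                else
                  memo.insert (i, j)
                    (min (min (memo.getD (i, j - 1) 0 + 1)
                              (memo.getD (i - 1, j) 0 + 1))
                         (memo.getD (i - 1, j - 1) 0 +
                            (if PySem.List.pyGetD s (i - 1) ' ' = PySem.List.pyGetD t (j - 1) ' '
                             then (0 : Int) else 1)))) memo) m).getD ((a : Int), (b : Int)) 0
          = Espec s t a b := by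
  intro fuel
  induction fuel with
  | zero =>
    intro lo m hfuel hlo Hm a b ha hb
    rw [PySem.List.pyRange_one_eq_nil (by omega), List.foldl_nil]
    exact Hm a b ha hb (by omega)
  | succ fuel ih =>
    intro lo m hfuel hlo Hm a b ha hb
    have hlt : lo < (s.length : Int) + (t.length : Int) + 1 := by omega
    rw [PySem.List.pyRange_one_cons hlt, List.foldl_cons]
    apply ih (lo + 1) _ (by omega) (by omega) ?_ a b ha hb
    intro a' b' ha' hb' hsum
    apply innerB s t lo (min lo (s.length : Int) + 1 - max 0 (lo - (t.length : Int))).toNat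
      (max 0 (lo - (t.length : Int))) m rfl (by omega) ?_ a' b' ha' hb' (by omega)
    intro a'' b'' ha'' hb'' hcond
    apply Hm a'' b'' ha'' hb''
    rcases hcond with h | ⟨hsum', hlt'⟩
    · exact h
    · exfalso; omega

lemma levB_eq (s t : List Char) : levB s t = Espec s t s.length t.length := by
  unfold levB
  exact outerB s t ((s.length : Int) + (t.length : Int) + 1 - 0).toNat 0 PySem.Dict.empty
    rfl (by omega) (by intro a b _ _ h; exfalso; omega) s.length t.length
    (by omega) (by omega)

lemma lev_eq (s t : List Char) : levA s t = levB s t := by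
  rw [levA_eq, levB_eq]

lemma matchKw_eq (w : List Char) (md : Int) :
    ∀ kws : List String, matchKwA w md kws = matchKwB w md kws := by
  intro kws
  induction kws with
  | nil => rfl
  | cons kw rest ih => rw [matchKwA, matchKwB, lev_eq, ih]

lemma find_eq (w : List Char) (md : Int) :
    ∀ l : List (String × List String), findA w md l = findB w md l := by
  intro l
  induction l with
  | nil => rfl
  | cons p rest ih =>
    obtain ⟨action, kws⟩ := p
    rw [findA, findB, matchKw_eq, ih]

-- ===== VERDICT (by name: the statement is the Claim_ definition above) =====
theorem fuzzy_match_action_py_spec : Claim_equal_fuzzy_match_action_py := by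
  intro word max_distance _
  unfold Spec_fuzzy_match_action_py fuzzy_match_action_py fuzzy_match_action_py_alt
  by_cases h : ((word.toList.length : Int) < 3)
  · rw [if_pos h, if_pos h]
  · rw [if_neg h, if_neg h, find_eq]
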